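-- pv_equiv track=rewrite | github.com/Mmaarten23/aoc | 2022/day18.py | amount_of_exterior_exposed_sides
-- ===== SOURCE A (Python) =====
-- def is_next_to_cube(cube1: tuple[int, int, int], cube2: tuple[int, int, int]) -> bool:
--     x1, y1, z1 = cube1
--     x2, y2, z2 = cube2
--     return is_next_to(x1, y1, z1, x2, y2, z2)
--
-- def is_next_to(x1, y1, z1, x2, y2, z2) -> bool:
--     return abs(x2 - x1) + abs(y2 - y1) + abs(z2 - z1) == 1
--
-- def amount_of_exterior_exposed_sides(
--         air: list[tuple[int, int, int]],
--         droplet: tuple[int, int, int]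
-- ) -> int:
--     sides: int = 0
--     for air_cube in air:
--         if is_next_to_cube(air_cube, droplet):
--             sides += 1
--     return sides
-- ===== SOURCE B (Python) =====
-- def amount_of_exterior_exposed_sides(
--         air: list[tuple[int, int, int]],
--         droplet: tuple[int, int, int]
-- ) -> int:
--     x, y, z = droplet
--     neighbors = [(x + 1, y, z), (x - 1, y, z),
--                  (x, y + 1, z), (x, y - 1, z),
--                  (x, y, z + 1), (x, y, z - 1)]
--     return sum(air.count(n) for n in neighbors)
-- ===== Notes on version B (the rewrite author's own statement) =====
-- stated objective: idiomatic
-- what changed: Instead of scanning every air cube and testing Manhattan distance 1, B enumerates the droplet's 6 axis neighbors and sums their occurrence counts in air (sum of air.count(n)), preserving duplicate multiplicities.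
import Mathlib
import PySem

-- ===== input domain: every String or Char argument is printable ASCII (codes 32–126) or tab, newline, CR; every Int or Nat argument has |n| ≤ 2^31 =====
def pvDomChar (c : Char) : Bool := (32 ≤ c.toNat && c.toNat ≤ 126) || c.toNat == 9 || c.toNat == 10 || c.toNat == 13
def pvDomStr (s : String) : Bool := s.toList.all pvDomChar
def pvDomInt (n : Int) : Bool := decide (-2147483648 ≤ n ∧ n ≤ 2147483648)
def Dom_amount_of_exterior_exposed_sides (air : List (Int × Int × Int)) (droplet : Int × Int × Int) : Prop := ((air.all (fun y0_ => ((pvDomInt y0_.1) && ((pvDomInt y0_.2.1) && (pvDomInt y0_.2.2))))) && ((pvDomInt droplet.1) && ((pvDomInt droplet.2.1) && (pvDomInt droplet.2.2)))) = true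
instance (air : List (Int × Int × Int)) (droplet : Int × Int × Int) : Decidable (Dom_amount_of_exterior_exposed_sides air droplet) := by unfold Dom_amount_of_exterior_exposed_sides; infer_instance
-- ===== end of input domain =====

-- B replaces A's distance test over every air cube by summing occurrence counts of the 6 axis neighbors (idiomatic; same return value).

-- ===== PORT A =====
def is_next_to (x1 y1 z1 x2 y2 z2 : Int) : Bool :=
  (x2 - x1).natAbs + (y2 - y1).natAbs + (z2 - z1).natAbs == 1

def is_next_to_cube (cube1 cube2 : Int × Int × Int) : Bool :=
  is_next_to cube1.1 cube1.2.1 cube1.2.2 cube2.1 cube2.2.1 cube2.2.2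

def amount_of_exterior_exposed_sides (air : List (Int × Int × Int)) (droplet : Int × Int × Int) : Int :=
  air.foldl (fun sides air_cube => if is_next_to_cube air_cube droplet then sides + 1 else sides) 0

-- ===== PORT B =====
def pvNeighbors (droplet : Int × Int × Int) : List (Int × Int × Int) :=
  let x := droplet.1; let y := droplet.2.1; let z := droplet.2.2
  [(x + 1, y, z), (x - 1, y, z), (x, y + 1, z), (x, y - 1, z), (x, y, z + 1), (x, y, z - 1)]

def amount_of_exterior_exposed_sides_alt (air : List (Int × Int × Int)) (droplet : Int × Int × Int) : Int :=
  ((pvNeighbors droplet).map (fun n => (PySem.List.count air n : Int))).sum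

-- ===== PRECONDITION & SPEC =====
def Spec_amount_of_exterior_exposed_sides (air : List (Int × Int × Int)) (droplet : Int × Int × Int) (out : Int) : Prop := out = amount_of_exterior_exposed_sides_alt air droplet
instance (air : List (Int × Int × Int)) (droplet : Int × Int × Int) (out : Int) : Decidable (Spec_amount_of_exterior_exposed_sides air droplet out) := by unfold Spec_amount_of_exterior_exposed_sides; infer_instance

-- ===== CLAIM (what is proved, stated in full; the proofs are below) =====
def Claim_equal_amount_of_exterior_exposed_sides : Prop := ∀ (air : List (Int × Int × Int)) (droplet : Int × Int × Int), Dom_amount_of_exterior_exposed_sides air droplet → Spec_amount_of_exterior_exposed_sides air droplet (amount_of_exterior_exposed_sides air droplet)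

-- ===== LEMMAS AND PROOFS =====

-- a cube is at Manhattan distance 1 from the droplet iff it occurs exactly once in the 6-neighbor list
theorem count_neighbors (d c : Int × Int × Int) :
    ((pvNeighbors d).count c : Int) = if is_next_to_cube c d then 1 else 0 := by
  obtain ⟨a, b, e⟩ := c
  obtain ⟨x, y, z⟩ := d
  simp only [pvNeighbors, is_next_to_cube, is_next_to, List.count_cons, List.count_nil,
    beq_iff_eq, Prod.mk.injEq]
  split_ifs <;> simp_all <;> omega

theorem sum_indicator (l : List (Int × Int × Int)) (c : Int × Int × Int) :
    (l.map (fun n => (if c == n then (1:Int) else 0))).sum = (l.count c : Int) := by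
  induction l with
  | nil => simp
  | cons a t ih =>
    simp only [List.map, List.sum_cons, List.count_cons]
    push_cast
    rw [ih, BEq.comm]
    split_ifs <;> omega

theorem key (air : List (Int × Int × Int)) (d : Int × Int × Int) :
    ((pvNeighbors d).map (fun n => (PySem.List.count air n : Int))).sum
      = (air.countP (fun c => is_next_to_cube c d) : Int) := by
  induction air with
  | nil => simp [PySem.List.count, pvNeighbors]
  | cons c t ih =>
    simp only [PySem.List.count_eq, List.count_cons, List.countP_cons] at *
    push_cast
    -- split each summand into the tail part and the head indicator
    have h1 : ((pvNeighbors d).map (fun n => ((t.count n : Int) + if c == n then 1 else 0))).sum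
        = ((pvNeighbors d).map (fun n => (t.count n : Int))).sum
          + ((pvNeighbors d).map (fun n => (if c == n then (1:Int) else 0))).sum := by
      rw [PySem.List.sum_map_add_int]
    have h2 : ((pvNeighbors d).map (fun n => (if c == n then (1:Int) else 0))).sum
        = ((pvNeighbors d).count c : Int) := sum_indicator (pvNeighbors d) c
    rw [h1, h2, count_neighbors, ih]

-- ===== VERDICT (by name: the statement is the Claim_ definition above) =====
theorem amount_of_exterior_exposed_sides_spec : Claim_equal_amount_of_exterior_exposed_sides := by
  intro air droplet _
  unfold Spec_amount_of_exterior_exposed_sides amount_of_exterior_exposed_sides amount_of_exterior_exposed_sides_alt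
  rw [PySem.List.foldl_if_add_one, key]
  simp
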